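-- pv_equiv track=rewrite | github.com/codeforjapan/mynumbercard_statistics | mynumbercard_data/stringutil.py | complement_error_lines
-- ===== SOURCE A (Python) =====
-- def complement_error_lines(lists: list, row_index: int,
--                            skip_first_line: bool) -> list:
--     ret = []
--     if (skip_first_line):
--         ret.append(lists.pop(0))
--     fill_data = ""
--     isEmpty = False
--     for lst in lists:
--         if (lst[row_index] is not None and lst[row_index] != ""):
--             fill_data = lst[row_index]
--             if (isEmpty):
--                 break
--         else:
--             isEmpty = True
--             if (fill_data != ''):
--                 break
--     if ((not isEmpty) or fill_data == ""):
--         return ret + lists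
--     for lst in lists:
--         if (lst[row_index] is None or lst[row_index] == ""):
--             lst[row_index] = fill_data
--         ret.append(lst)
--     return ret
-- ===== SOURCE B (Python) =====
-- def complement_error_lines(lists: list, row_index: int,
--                            skip_first_line: bool) -> list:
--     ret = []
--     if skip_first_line:
--         ret.append(lists.pop(0))
--     e = next((i for i, r in enumerate(lists)
--               if r[row_index] is None or r[row_index] == ""), None)
--     if e is None:
--         return ret + lists
--     if e > 0:
--         fill = lists[e - 1][row_index]
--     else:
--         fill = next((r[row_index] for r in lists
--                      if r[row_index] is not None and r[row_index] != ""), None)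
--         if fill is None:
--             return ret + lists
--     for r in lists:
--         if r[row_index] is None or r[row_index] == "":
--             r[row_index] = fill
--     return ret + lists
-- ===== Notes on version B (the rewrite author's own statement) =====
-- stated objective: simpler
-- what changed: Replaces A's stateful scan (fill_data/isEmpty flags with two break conditions) by a direct decomposition: find the index of the first empty cell, pick the fill value from the adjacent row (previous row, or first non-empty row when the empty is first), then fill in one pass.
import Mathlib
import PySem

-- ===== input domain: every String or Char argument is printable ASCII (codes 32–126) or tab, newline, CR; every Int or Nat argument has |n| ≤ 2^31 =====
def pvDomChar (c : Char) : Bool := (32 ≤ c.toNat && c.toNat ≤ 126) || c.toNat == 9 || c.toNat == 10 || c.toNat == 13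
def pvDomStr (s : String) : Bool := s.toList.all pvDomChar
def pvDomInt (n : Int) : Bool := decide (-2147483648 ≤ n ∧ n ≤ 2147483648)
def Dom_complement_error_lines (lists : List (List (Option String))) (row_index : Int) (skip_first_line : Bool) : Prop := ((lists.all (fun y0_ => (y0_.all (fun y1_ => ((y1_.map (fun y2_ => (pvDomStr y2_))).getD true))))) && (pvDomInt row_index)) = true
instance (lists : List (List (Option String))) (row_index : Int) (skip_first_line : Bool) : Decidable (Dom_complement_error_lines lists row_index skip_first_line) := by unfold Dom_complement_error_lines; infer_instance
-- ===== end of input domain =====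

-- B replaces A's stateful scan (fill_data/isEmpty flags, two break conditions) by a direct
-- decomposition: find the first empty cell's index, take the fill value from the adjacent row,
-- fill in one pass.  Both Pythons mutate `lists` in place (pop(0) and cell writes) identically;
-- the equivalence proved here is about the return value.

-- ===== PORT A =====
-- shared one-liner: Python's `x is None or x == ""` on a cell
def pvEmptyCell (c : Option String) : Bool := c == none || c == some ""

-- first for-loop of A: state (fill_data, isEmpty); fill_data `""` is encoded as `none`
-- (fill_data is only ever `""` or a non-empty cell value)
def pvA_scan (rows : List (List (Option String))) (ri : Int) (fill : Option String) (isEmpty : Bool) : Option String × Bool :=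
  match rows with
  | [] => (fill, isEmpty)
  | r :: rest =>
    match PySem.List.pyGet? r ri with
    | none => (fill, isEmpty)      -- IndexError in Python; unreachable under Pre_
    | some c =>
      if !pvEmptyCell c then
        if isEmpty then (c, isEmpty) else pvA_scan rest ri c isEmpty
      else
        if fill ≠ none then (fill, true) else pvA_scan rest ri fill true

-- second for-loop of A: append each row to ret, writing the empty cell first
def pvA_fill (rows : List (List (Option String))) (ri : Int) (fill : Option String) (ret : List (List (Option String))) : List (List (Option String)) :=
  rows.foldl (fun acc r =>
    acc ++ [match PySem.List.pyGet? r ri with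
            | none => r            -- IndexError in Python; unreachable under Pre_
            | some c => if pvEmptyCell c then PySem.List.pySetD r ri fill else r]) ret

def complement_error_lines (lists : List (List (Option String))) (row_index : Int) (skip_first_line : Bool) : List (List (Option String)) :=
  let ret := if skip_first_line then lists.take 1 else []      -- ret.append(lists.pop(0))
  let rows := if skip_first_line then lists.drop 1 else lists  -- (pop on [] raises: outside Pre_)
  let s := pvA_scan rows row_index none false
  if s.2 = false ∨ s.1 = none then ret ++ rows
  else pvA_fill rows row_index s.1 ret

-- ===== PORT B =====
def pvCell (r : List (Option String)) (ri : Int) : Option String := PySem.List.pyGetD r ri none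

def complement_error_lines_alt (lists : List (List (Option String))) (row_index : Int) (skip_first_line : Bool) : List (List (Option String)) :=
  let ret := if skip_first_line then lists.take 1 else []
  let rows := if skip_first_line then lists.drop 1 else lists
  match ((PySem.List.enumerate rows).find? (fun p => pvEmptyCell (pvCell p.2 row_index))).map (·.1) with
  | none => ret ++ rows
  | some e =>
    let fill? : Option (Option String) :=
      if e > 0 then some (pvCell (PySem.List.pyGetD rows (e - 1) []) row_index)
      else (rows.find? (fun r => !pvEmptyCell (pvCell r row_index))).map (fun r => pvCell r row_index)
    match fill? with
    | none => ret ++ rows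
    | some fill =>
      ret ++ rows.map (fun r => if pvEmptyCell (pvCell r row_index) then PySem.List.pySetD r row_index fill else r)

-- ===== PRECONDITION & SPEC =====
-- exactly the inputs where A returns: pop(0) succeeds and every scanned row is indexable
def Pre_complement_error_lines (lists : List (List (Option String))) (row_index : Int) (skip_first_line : Bool) : Prop :=
  (skip_first_line = true → lists ≠ []) ∧
  ∀ r ∈ (if skip_first_line then lists.drop 1 else lists), PySem.Raise.InRange r.length row_index
instance (lists : List (List (Option String))) (row_index : Int) (skip_first_line : Bool) : Decidable (Pre_complement_error_lines lists row_index skip_first_line) := by unfold Pre_complement_error_lines; infer_instance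

def pvWitness_complement_error_lines : List (List (Option String)) × Int × Bool :=
  ([[some "h"], [some "a"], [none], [some ""], [some "b"]], 0, true)

def Spec_complement_error_lines (lists : List (List (Option String))) (row_index : Int) (skip_first_line : Bool) (out : List (List (Option String))) : Prop := out = complement_error_lines_alt lists row_index skip_first_line
instance (lists : List (List (Option String))) (row_index : Int) (skip_first_line : Bool) (out : List (List (Option String))) : Decidable (Spec_complement_error_lines lists row_index skip_first_line out) := by unfold Spec_complement_error_lines; infer_instance

-- ===== CLAIM (what is proved, stated in full; the proofs are below) =====
def Claim_equal_complement_error_lines : Prop := ∀ (lists : List (List (Option String))) (row_index : Int) (skip_first_line : Bool), Dom_complement_error_lines lists row_index skip_first_line → Pre_complement_error_lines lists row_index skip_first_line → Spec_complement_error_lines lists row_index skip_first_line (complement_error_lines lists row_index skip_first_line)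

-- ===== LEMMAS AND PROOFS =====

theorem pv_witness_ok : Dom_complement_error_lines pvWitness_complement_error_lines.1 pvWitness_complement_error_lines.2.1 pvWitness_complement_error_lines.2.2 ∧ Pre_complement_error_lines pvWitness_complement_error_lines.1 pvWitness_complement_error_lines.2.1 pvWitness_complement_error_lines.2.2 := by
  constructor <;> decide

theorem pvGet_eq_cell (r : List (Option String)) (ri : Int) (h : PySem.Raise.InRange r.length ri) :
    PySem.List.pyGet? r ri = some (pvCell r ri) := by
  cases hq : PySem.List.pyGet? r ri with
  | none =>
    rw [PySem.List.pyGet?_eq_none_iff] at hq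
    exact absurd h hq
  | some c =>
    have hg : pvCell r ri = c := by
      simp only [PySem.List.pyGet?] at hq
      simp only [pvCell, PySem.List.pyGetD, PySem.List.pyGet?, hq, Option.getD_some]
    rw [hg]

theorem pv_ne_none (c : Option String) (h : pvEmptyCell c = false) : c ≠ none := by
  cases c <;> simp [pvEmptyCell] at h ⊢

theorem pv_scan_nonempty_prefix (ri : Int) (pre rest : List (List (Option String))) (f : Option String)
    (h : ∀ r ∈ pre, PySem.Raise.InRange r.length ri ∧ pvEmptyCell (pvCell r ri) = false) :
    pvA_scan (pre ++ rest) ri f false = pvA_scan rest ri (pre.foldl (fun _ r => pvCell r ri) f) false := by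
  induction pre generalizing f with
  | nil => simp
  | cons r rs ih =>
    have hr := h r (by simp)
    rw [List.cons_append]
    rw [show pvA_scan ((r :: (rs ++ rest))) ri f false = pvA_scan (rs ++ rest) ri (pvCell r ri) false by
      simp [pvA_scan, pvGet_eq_cell r ri hr.1, hr.2]]
    rw [List.foldl_cons]
    exact ih _ (fun r hr => h r (by simp [hr]))

theorem pv_scan_empty_none (ri : Int) (rows : List (List (Option String)))
    (h : ∀ r ∈ rows, PySem.Raise.InRange r.length ri) :
    pvA_scan rows ri none true =
      (((rows.find? (fun r => !pvEmptyCell (pvCell r ri))).map (fun r => pvCell r ri)).getD none, true) := by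
  induction rows with
  | nil => simp [pvA_scan]
  | cons r rs ih =>
    have hr := h r (by simp)
    cases hemp : pvEmptyCell (pvCell r ri) with
    | true =>
      rw [show pvA_scan (r :: rs) ri none true = pvA_scan rs ri none true by
        simp [pvA_scan, pvGet_eq_cell r ri hr, hemp]]
      rw [List.find?_cons_of_neg (by simp [hemp])]
      exact ih (fun r hr => h r (by simp [hr]))
    | false =>
      rw [List.find?_cons_of_pos (by simp [hemp])]
      simp [pvA_scan, pvGet_eq_cell r ri hr, hemp]

theorem pv_eFind_none (ri : Int) (rows : List (List (Option String))) (s : Int)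
    (h : ∀ r ∈ rows, pvEmptyCell (pvCell r ri) = false) :
    ((PySem.List.enumerate rows s).find? (fun p => pvEmptyCell (pvCell p.2 ri))).map (·.1) = none := by
  induction rows generalizing s with
  | nil => simp [PySem.List.enumerate_nil]
  | cons r rs ih =>
    rw [PySem.List.enumerate_cons, List.find?_cons_of_neg (by simp [h r (by simp)])]
    exact ih (s + 1) (fun r hr => h r (by simp [hr]))

theorem pv_eFind_some (ri : Int) (pre : List (List (Option String))) (x : List (Option String))
    (rest : List (List (Option String))) (s : Int)
    (h : ∀ r ∈ pre, pvEmptyCell (pvCell r ri) = false) (hx : pvEmptyCell (pvCell x ri) = true) :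
    ((PySem.List.enumerate (pre ++ x :: rest) s).find? (fun p => pvEmptyCell (pvCell p.2 ri))).map (·.1)
      = some (s + pre.length) := by
  induction pre generalizing s with
  | nil =>
    rw [List.nil_append, PySem.List.enumerate_cons, List.find?_cons_of_pos (by simp [hx])]
    simp
  | cons r rs ih =>
    rw [List.cons_append, PySem.List.enumerate_cons, List.find?_cons_of_neg (by simp [h r (by simp)])]
    rw [ih (s + 1) (fun r hr => h r (by simp [hr]))]
    congr 1
    push_cast [List.length_cons]
    omega

theorem pv_foldl_last (ri : Int) (pre : List (List (Option String))) (f : Option String) (hne : pre ≠ []) :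
    pre.foldl (fun _ r => pvCell r ri) f = pvCell (pre.getLast hne) ri := by
  induction pre generalizing f with
  | nil => exact absurd rfl hne
  | cons r rs ih =>
    cases rs with
    | nil => simp
    | cons a b =>
      rw [List.foldl_cons, List.getLast_cons (by simp)]
      exact ih _ (by simp)

theorem pv_fill_eq_map (ri : Int) (rows : List (List (Option String))) (fill : Option String)
    (ret : List (List (Option String))) (h : ∀ r ∈ rows, PySem.Raise.InRange r.length ri) :
    pvA_fill rows ri fill ret =
      ret ++ rows.map (fun r => if pvEmptyCell (pvCell r ri) then PySem.List.pySetD r ri fill else r) := by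
  unfold pvA_fill
  rw [PySem.List.foldl_append_singleton_eq_map _ rows ret]
  congr 1
  apply List.map_congr_left
  intro r hr
  rw [pvGet_eq_cell r ri (h r hr)]

theorem pv_core_eq (ri : Int) (rows ret : List (List (Option String)))
    (h : ∀ r ∈ rows, PySem.Raise.InRange r.length ri) :
    (let s := pvA_scan rows ri none false;
     if s.2 = false ∨ s.1 = none then ret ++ rows else pvA_fill rows ri s.1 ret)
    =
    (match ((PySem.List.enumerate rows).find? (fun p => pvEmptyCell (pvCell p.2 ri))).map (·.1) with
     | none => ret ++ rows
     | some e =>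
       let fill? : Option (Option String) :=
         if e > 0 then some (pvCell (PySem.List.pyGetD rows (e - 1) []) ri)
         else (rows.find? (fun r => !pvEmptyCell (pvCell r ri))).map (fun r => pvCell r ri)
       match fill? with
       | none => ret ++ rows
       | some fill =>
         ret ++ rows.map (fun r => if pvEmptyCell (pvCell r ri) then PySem.List.pySetD r ri fill else r)) := by
  cases hsplit : rows.dropWhile (fun r => !pvEmptyCell (pvCell r ri)) with
  | nil =>
    have hall : ∀ r ∈ rows, pvEmptyCell (pvCell r ri) = false := by
      intro r hr
      have := List.dropWhile_eq_nil_iff.mp hsplit r hr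
      simpa using this
    have hsc := pv_scan_nonempty_prefix ri rows [] none (fun r hr => ⟨h r hr, hall r hr⟩)
    rw [List.append_nil] at hsc
    rw [pv_eFind_none ri rows 0 hall]
    simp [hsc, pvA_scan]
  | cons x rest =>
    have hrows : rows.takeWhile (fun r => !pvEmptyCell (pvCell r ri)) ++ x :: rest = rows := by
      rw [← hsplit]; exact List.takeWhile_append_dropWhile
    set pre := rows.takeWhile (fun r => !pvEmptyCell (pvCell r ri)) with hpredef
    have hx : pvEmptyCell (pvCell x ri) = true := by
      have := List.head_dropWhile_not (p := fun r => !pvEmptyCell (pvCell r ri)) (l := rows) (by simp [hsplit])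
      simp only [hsplit, List.head_cons] at this
      simpa using this
    have hallpre : ∀ r ∈ pre, pvEmptyCell (pvCell r ri) = false := by
      intro r hr
      have := List.mem_takeWhile_imp hr
      simpa using this
    have hxIn : PySem.Raise.InRange x.length ri := h x (by rw [← hrows]; simp)
    have hrestIn : ∀ r ∈ rest, PySem.Raise.InRange r.length ri := by
      intro r hr; exact h r (by rw [← hrows]; simp [hr])
    have hpreIn : ∀ r ∈ pre, PySem.Raise.InRange r.length ri := by
      intro r hr; exact h r (by rw [← hrows]; simp [hr])
    have hscan : pvA_scan rows ri none false
        = pvA_scan (x :: rest) ri (pre.foldl (fun _ r => pvCell r ri) none) false := by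
      rw [← hrows]
      exact pv_scan_nonempty_prefix ri pre (x :: rest) none (fun r hr => ⟨hpreIn r hr, hallpre r hr⟩)
    have hBfind : ((PySem.List.enumerate rows 0).find? (fun p => pvEmptyCell (pvCell p.2 ri))).map (·.1)
        = some (0 + (pre.length : Int)) := by
      rw [← hrows]
      exact pv_eFind_some ri pre x rest 0 hallpre hx
    rw [hBfind]
    by_cases hpe : pre = []
    · -- first row is empty: fill comes from the first non-empty row after it
      have hF : pre.foldl (fun _ r => pvCell r ri) none = none := by rw [hpe]; rfl
      rw [hF] at hscan
      have hstep : pvA_scan (x :: rest) ri none false = pvA_scan rest ri none true := by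
        simp [pvA_scan, pvGet_eq_cell x ri hxIn, hx]
      have hrest := pv_scan_empty_none ri rest hrestIn
      have hfindrows : rows.find? (fun r => !pvEmptyCell (pvCell r ri))
          = rest.find? (fun r => !pvEmptyCell (pvCell r ri)) := by
        conv_lhs => rw [← hrows, hpe]
        rw [List.nil_append, List.find?_cons_of_neg (by simp [hx])]
      have he : (0 : Int) + (pre.length : Int) = 0 := by rw [hpe]; rfl
      rw [he]
      simp only [gt_iff_lt, lt_irrefl, if_false, hfindrows]
      cases hf : rest.find? (fun r => !pvEmptyCell (pvCell r ri)) with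
      | none =>
        rw [hf] at hrest
        simp [hscan, hstep, hrest]
      | some r' =>
        rw [hf] at hrest
        have hr'emp : pvEmptyCell (pvCell r' ri) = false := by
          have := List.find?_some hf
          simpa using this
        have hr'ne : pvCell r' ri ≠ none := pv_ne_none _ hr'emp
        simp only [Option.map_some, Option.getD_some] at hrest
        rw [show (let s := pvA_scan rows ri none false;
            if s.2 = false ∨ s.1 = none then ret ++ rows else pvA_fill rows ri s.1 ret)
            = pvA_fill rows ri (pvCell r' ri) ret by
          simp [hscan, hstep, hrest, hr'ne]]
        rw [pv_fill_eq_map ri rows (pvCell r' ri) ret h]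
        simp
    · -- fill is the cell just before the first empty row
      have hlastmem : pre.getLast hpe ∈ pre := List.getLast_mem hpe
      have hF : pre.foldl (fun _ r => pvCell r ri) none = pvCell (pre.getLast hpe) ri :=
        pv_foldl_last ri pre none hpe
      have hFne : pvCell (pre.getLast hpe) ri ≠ none := pv_ne_none _ (hallpre _ hlastmem)
      have hstep : pvA_scan (x :: rest) ri (pvCell (pre.getLast hpe) ri) false
          = (pvCell (pre.getLast hpe) ri, true) := by
        simp [pvA_scan, pvGet_eq_cell x ri hxIn, hx, hFne]
      have hpos : (0 : Int) + (pre.length : Int) > 0 := by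
        have : 0 < pre.length := List.length_pos_of_ne_nil hpe
        omega
      have hidx : PySem.List.pyGetD rows ((0 : Int) + (pre.length : Int) - 1) [] = pre.getLast hpe := by
        have hcast : (0 : Int) + (pre.length : Int) - 1 = ((pre.length - 1 : Nat) : Int) := by
          have : 0 < pre.length := List.length_pos_of_ne_nil hpe
          omega
        rw [hcast, PySem.List.pyGetD_natCast]
        rw [← hrows]
        have hlt : pre.length - 1 < pre.length := by
          have : 0 < pre.length := List.length_pos_of_ne_nil hpe
          omega
        rw [List.getD_eq_getElem?_getD, List.getElem?_append_left (by omega)]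
        rw [List.getElem?_eq_getElem hlt, List.getLast_eq_getElem]
        rfl
      rw [show (let s := pvA_scan rows ri none false;
          if s.2 = false ∨ s.1 = none then ret ++ rows else pvA_fill rows ri s.1 ret)
          = pvA_fill rows ri (pvCell (pre.getLast hpe) ri) ret by
        simp [hscan, hF, hstep, hFne]]
      simp only [hpos, if_true]
      rw [hidx]
      rw [pv_fill_eq_map ri rows _ ret h]

-- ===== VERDICT (by name: the statement is the Claim_ definition above) =====
theorem complement_error_lines_spec : Claim_equal_complement_error_lines := by
  intro lists ri skip _hdom hpre
  unfold Spec_complement_error_lines complement_error_lines complement_error_lines_alt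
  exact pv_core_eq ri _ _ hpre.2
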